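-- pv_equiv track=rewrite | github.com/AlterAyrol/Study | Module18/08_ticker/main.py | work_row
-- ===== SOURCE A (Python) =====
-- def work_row(r1, r2):
--     work_shift = 1
--     if r1 == r2:
--         return work_shift
--     elif r1 != r2:
--         for _ in range(len(r2)):
--             work_shift += 1
--             r2 = r2[-1] + r2[:-1]
--             if r1 == r2:
--                 break
--     return work_shift
-- ===== SOURCE B (Python) =====
-- def work_row(r1, r2):
--     # Find r1 in r2+r2 (rightmost occurrence within rotation positions) instead of rotating one step at a time.
--     if r1 == r2:
--         return 1
--     n = len(r2)
--     if len(r1) != n: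
--         return 1 + n
--     p = (r2 + r2).rfind(r1, 1)
--     return 1 + (n - p) if p != -1 else 1 + n
-- ===== Notes on version B (the rewrite author's own statement) =====
-- stated objective: faster
-- what changed: Replaces A's loop that rotates r2 one character at a time and compares whole strings (O(n^2)) by a single rightmost substring search of r1 in r2+r2, reading the rotation count off the match position.
import Mathlib
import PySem

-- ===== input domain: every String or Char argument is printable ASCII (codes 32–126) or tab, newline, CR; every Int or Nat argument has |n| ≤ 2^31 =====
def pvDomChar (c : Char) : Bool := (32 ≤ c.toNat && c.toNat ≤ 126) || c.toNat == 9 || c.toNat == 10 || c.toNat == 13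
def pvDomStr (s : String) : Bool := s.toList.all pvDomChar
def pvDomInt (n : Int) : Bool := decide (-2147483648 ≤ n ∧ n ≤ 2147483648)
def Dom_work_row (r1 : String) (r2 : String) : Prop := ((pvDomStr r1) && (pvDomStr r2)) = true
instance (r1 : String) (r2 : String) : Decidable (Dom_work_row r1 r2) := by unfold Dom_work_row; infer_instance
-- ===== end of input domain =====

-- B replaces A's quadratic rotate-one-step-and-compare loop by a single rightmost search of r1
-- inside r2+r2 (Python str.rfind); return values are identical, no side effects involved.

-- ===== PORT A =====
-- r2 = r2[-1] + r2[:-1]  (the loop body only runs on nonempty r2, so the 'none' arm is unreachable)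
def pvRot1 (l : List Char) : List Char :=
  match PySem.List.pyGet? l (-1) with
  | some c => c :: PySem.List.slice l none (some (-1))
  | none => l

-- the 'for _ in range(len(r2))' loop with the running work_shift and the rotated r2
def pvAuxA (l1 : List Char) : Nat → Int → List Char → Int
  | 0, s, _ => s
  | f+1, s, cur =>
      let cur' := pvRot1 cur
      if l1 = cur' then s + 1 else pvAuxA l1 f (s + 1) cur'

def work_row (r1 : String) (r2 : String) : Int :=
  if r1 == r2 then 1 else pvAuxA r1.toList (r2.toList.length) 1 r2.toList

-- ===== PORT B =====
-- hand port of (r2+r2).rfind(r1, 1): rightmost p ≥ 1 with d[p:p+len(r1)] == r1, scanned downward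
def pvRFindAux (d l1 : List Char) : Nat → Option Nat
  | 0 => none
  | p + 1 => if (d.drop (p + 1)).take l1.length = l1 then some (p + 1) else pvRFindAux d l1 p

def work_row_alt (r1 : String) (r2 : String) : Int :=
  if r1 == r2 then 1
  else
    let n := r2.toList.length
    if r1.toList.length ≠ n then 1 + (n : Int)
    else
      let d := r2.toList ++ r2.toList
      match pvRFindAux d r1.toList (d.length - r1.toList.length) with
      | some p => 1 + ((n : Int) - p)
      | none => 1 + (n : Int)

-- ===== PRECONDITION & SPEC =====
def Spec_work_row (r1 : String) (r2 : String) (out : Int) : Prop := out = work_row_alt r1 r2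
instance (r1 : String) (r2 : String) (out : Int) : Decidable (Spec_work_row r1 r2 out) := by unfold Spec_work_row; infer_instance

-- ===== CLAIM (what is proved, stated in full; the proofs are below) =====
def Claim_equal_work_row : Prop := ∀ (r1 : String) (r2 : String), Dom_work_row r1 r2 → Spec_work_row r1 r2 (work_row r1 r2)

-- ===== LEMMAS AND PROOFS =====

-- one right-rotation is List.rotate by length-1
theorem pvRot1_eq (l : List Char) : pvRot1 l = l.rotate (l.length - 1) := by
  rcases List.eq_nil_or_concat l with rfl | ⟨xs, x, rfl⟩
  · rfl
  · simp only [pvRot1, PySem.List.slice_to_neg_one]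
    rw [List.rotate_eq_drop_append_take (by simp)]
    simp

theorem pvRot1_length (l : List Char) : (pvRot1 l).length = l.length := by
  rw [pvRot1_eq]; simp

-- when the lengths differ, A's loop never breaks
theorem pvAuxA_len (l1 : List Char) :
    ∀ (f : Nat) (s : Int) (cur : List Char), l1.length ≠ cur.length →
      pvAuxA l1 f s cur = s + f := by
  intro f
  induction f with
  | zero => intro s cur _; simp [pvAuxA]
  | succ f ih =>
    intro s cur h
    have hlen : l1.length ≠ (pvRot1 cur).length := by rw [pvRot1_length]; exact h
    have hne : l1 ≠ pvRot1 cur := fun he => hlen (by rw [he])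
    simp only [pvAuxA, if_neg hne]
    rw [ih _ _ hlen]
    push_cast; ring

-- a window match in l2 ++ l2 is exactly a rotation (equal lengths, p ≤ length)
theorem matchAt_eq (l1 l2 : List Char) (p : Nat) (hp : p ≤ l2.length)
    (hl : l1.length = l2.length) :
    ((l2 ++ l2).drop p).take l1.length = l2.rotate p := by
  rw [List.drop_append_of_le_length hp, hl]
  have h1 : l2.length = (l2.drop p).length + p := by simp; omega
  rw [h1, List.take_append, List.rotate_eq_drop_append_take hp]
  simp

-- A's loop over the rotated list equals B's downward scan of l2 ++ l2
theorem loop_eq (l1 l2 : List Char) (hl : l1.length = l2.length) :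
    ∀ (f : Nat), f ≤ l2.length → ∀ (s : Int), l1 ≠ l2.rotate f →
      pvAuxA l1 f s (l2.rotate f) =
        (match pvRFindAux (l2 ++ l2) l1 f with
         | some p => s + ((f : Int) - p)
         | none => s + f) := by
  intro f
  induction f with
  | zero => intro _ s _; simp [pvAuxA, pvRFindAux]
  | succ f ih =>
    intro hf s hne
    have hn1 : 1 ≤ l2.length := by omega
    have hcur : pvRot1 (l2.rotate (f + 1)) = l2.rotate f := by
      rw [pvRot1_eq, List.length_rotate, List.rotate_rotate]
      have : f + 1 + (l2.length - 1) = f + l2.length := by omega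
      rw [this, ← List.rotate_mod, Nat.add_mod_right, Nat.mod_eq_of_lt (by omega)]
    have hmatch : ((l2 ++ l2).drop (f + 1)).take l1.length ≠ l1 := by
      rw [matchAt_eq l1 l2 (f + 1) hf hl]
      exact fun he => hne he.symm
    simp only [pvAuxA, pvRFindAux, hcur, if_neg hmatch]
    by_cases heq : l1 = l2.rotate f
    · rw [if_pos heq]
      cases f with
      | zero => simp [pvRFindAux]
      | succ g =>
        have : ((l2 ++ l2).drop (g + 1)).take l1.length = l1 := by
          rw [matchAt_eq l1 l2 (g + 1) (by omega) hl]; exact heq.symm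
        simp only [pvRFindAux, if_pos this]
        push_cast; ring
    · rw [if_neg heq, ih (by omega) (s + 1) heq]
      cases h : pvRFindAux (l2 ++ l2) l1 f
      · simp; ring
      · simp; ring

-- ===== VERDICT (by name: the statement is the Claim_ definition above) =====
theorem work_row_spec : Claim_equal_work_row := by
  intro r1 r2 _
  unfold Spec_work_row work_row work_row_alt
  by_cases h : r1 = r2
  · simp [h]
  have hb : (r1 == r2) = false := by simp [h]
  rw [hb]
  simp only [Bool.false_eq_true, if_false]
  by_cases hl : r1.toList.length = r2.toList.length
  · rw [if_neg (by omega)]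
    have hne : r1.toList ≠ r2.toList := fun he => h (String.toList_inj.mp he)
    have hstart : (r2.toList ++ r2.toList).length - r1.toList.length = r2.toList.length := by
      rw [List.length_append]; omega
    rw [hstart]
    have hloop := loop_eq r1.toList r2.toList hl r2.toList.length le_rfl 1
      (by rw [List.rotate_length]; exact hne)
    rw [List.rotate_length] at hloop
    rw [hloop]
  · rw [if_pos (by omega)]
    rw [pvAuxA_len r1.toList _ _ _ (by omega)]
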